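-- pv_equiv track=rewrite | github.com/gordon-tech/SheetMusicID | Singel_Query.py | rankHistograms
-- ===== SOURCE A (Python) =====
-- def rankHistograms(offsetDict, bin_size=5):
--     histograms = {}
--     pieceScores = []
--     for key in offsetDict:
--         h = offsetDict[key]
--         maxh = max(h)
--         minh = min(h)
--         if (maxh > minh + bin_size):
--             hist = [0 for i in range(int((maxh - minh) / bin_size) + 1)]
--             for i in h:
--                 hist[int((i - minh) / bin_size)] += 1
--             score = max(hist)
--             pieceScores.append((key, score))
--             histograms[key] = (h, len(set(h)))
--
--     pieceScores = sorted(pieceScores, key=lambda x: x[1], reverse=True)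
--     return pieceScores, histograms
-- ===== SOURCE B (Python) =====
-- def rankHistograms(offsetDict, bin_size=5):
--     # stage 1: keep the pieces that pass the spread guard
--     kept = []
--     for key, h in offsetDict.items():
--         minh = min(h)
--         if max(h) > minh + bin_size:
--             kept.append((key, h, minh))
--     # stage 2: score each kept piece by the longest run of equal bucket
--     # indices over its sorted offsets (bucketing is monotone in the value,
--     # so equal buckets are contiguous and the longest run is the peak bin)
--     pieceScores = []
--     for key, h, minh in kept:
--         best, cur, prev = 0, 0, None
--         for v in sorted(h):
--             b = int((v - minh) / bin_size)
--             cur = cur + 1 if prev == b else 1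
--             best = max(best, cur)
--             prev = b
--         pieceScores.append((key, best))
--     pieceScores.sort(key=lambda x: x[1], reverse=True)
--     histograms = {key: (h, len(set(h))) for key, h, _ in kept}
--     return pieceScores, histograms
-- ===== Notes on version B (the rewrite author's own statement) =====
-- stated objective: alternative
-- what changed: B replaces A's single-pass allocate-and-fill histogram array (indexed increments, then max over the array) by a staged pipeline: filter the pieces by the spread guard, then score each piece as the longest run of equal bucket indices over its SORTED offsets (bucketing is monotone, so equal buckets are contiguous), then build the histograms dict in a separate comprehension.
import Mathlib
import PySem

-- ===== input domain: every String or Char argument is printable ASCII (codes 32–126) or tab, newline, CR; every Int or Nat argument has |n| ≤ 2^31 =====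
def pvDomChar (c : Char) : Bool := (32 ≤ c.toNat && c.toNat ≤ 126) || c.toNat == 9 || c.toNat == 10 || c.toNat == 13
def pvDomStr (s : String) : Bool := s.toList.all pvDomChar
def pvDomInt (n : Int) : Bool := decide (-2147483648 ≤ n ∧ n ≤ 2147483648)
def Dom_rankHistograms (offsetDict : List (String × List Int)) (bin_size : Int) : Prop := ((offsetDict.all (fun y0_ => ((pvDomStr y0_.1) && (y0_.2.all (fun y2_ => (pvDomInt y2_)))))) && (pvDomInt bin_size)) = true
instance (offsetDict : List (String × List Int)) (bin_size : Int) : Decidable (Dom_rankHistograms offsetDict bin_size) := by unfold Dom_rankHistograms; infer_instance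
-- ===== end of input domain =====

-- B scores a piece by the longest run of equal bucket indices over its sorted offsets
-- (bucketing is monotone in the value, so the longest run is A's peak histogram bin),
-- in a staged filter/score/dict pipeline instead of A's fused histogram-array pass.

-- ===== PORT A =====
-- Literal port of A. `for key in offsetDict: h = offsetDict[key]` iterates the dict's pairs in
-- insertion order and looks the key up; `int(x / y)` is PySem.Int.truncdiv (exact here: |values| ≤ 2^31
-- so |numerator| ≤ 2^33 < 2^53); `hist[idx] += 1` is pySetD/pyGetD (IndexError cases excluded by Pre_);
-- `max(h)` / `min(h)` raise ValueError on [] — excluded by Pre_, the port uses the total `.getD 0` form there.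
def rankHistograms (offsetDict : List (String × List Int)) (bin_size : Int) : (List (String × Int)) × (List (String × List Int × Int)) :=
  let acc := offsetDict.foldl (fun (acc : List (String × Int) × PySem.Dict String (List Int × Int)) kv =>
    let h := (PySem.Dict.mk offsetDict).getD kv.1 []
    let maxh := (PySem.List.max? h (fun x => x)).getD 0
    let minh := (PySem.List.min? h (fun x => x)).getD 0
    if maxh > minh + bin_size then
      let hist0 := List.replicate (PySem.Int.truncdiv (maxh - minh) bin_size + 1).toNat (0 : Int)
      let hist := h.foldl (fun a i =>
        PySem.List.pySetD a (PySem.Int.truncdiv (i - minh) bin_size)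
          (PySem.List.pyGetD a (PySem.Int.truncdiv (i - minh) bin_size) 0 + 1)) hist0
      let score := (PySem.List.max? hist (fun x => x)).getD 0
      (acc.1 ++ [(kv.1, score)], acc.2.insert kv.1 (h, ((PySem.Set.ofList h).length : Int)))
    else acc) ([], PySem.Dict.empty)
  (PySem.List.sorted acc.1 (fun x => x.2) true, acc.2.items)

-- ===== PORT B =====
-- Literal port of Source B: stage 1 collects the kept (key, h, minh) triples; stage 2 maps each to
-- its longest-run score over sorted(h); the histograms dict comprehension is a fold over kept.
def rankHistograms_alt (offsetDict : List (String × List Int)) (bin_size : Int) : (List (String × Int)) × (List (String × List Int × Int)) :=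
  let kept := offsetDict.foldl (fun (acc : List (String × List Int × Int)) kv =>
    let minh := (PySem.List.min? kv.2 (fun x => x)).getD 0
    if (PySem.List.max? kv.2 (fun x => x)).getD 0 > minh + bin_size then
      acc ++ [(kv.1, kv.2, minh)]
    else acc) []
  let pieceScores := kept.map (fun t =>
    (t.1, ((PySem.List.sorted t.2.1 (fun x => x) false).foldl
        (fun (st : Int × Int × Option Int) v =>
          let b := PySem.Int.truncdiv (v - t.2.2) bin_size
          let cur := if st.2.2 = some b then st.2.1 + 1 else 1
          (max st.1 cur, cur, some b)) (0, 0, none)).1))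
  let histograms := kept.foldl (fun (d : PySem.Dict String (List Int × Int)) t =>
      d.insert t.1 (t.2.1, ((PySem.Set.ofList t.2.1).length : Int))) PySem.Dict.empty
  (PySem.List.sorted pieceScores (fun x => x.2) true, histograms.items)

-- ===== PRECONDITION & SPEC =====
-- Pre_ excludes exactly the inputs where the Python A raises: an empty offset list (max/min raise
-- ValueError), and keys whose spread reaches the bucketing with bin_size ≤ 0 (ZeroDivisionError for
-- bin_size = 0, IndexError on the empty histogram for bin_size < 0); duplicate keys are also excluded,
-- which the Python dict argument cannot carry (assoc-list representation).
def Pre_rankHistograms (offsetDict : List (String × List Int)) (bin_size : Int) : Prop :=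
  (∀ kv ∈ offsetDict, kv.2 ≠ [] ∧
    (0 < bin_size ∨ ∀ x ∈ kv.2, ∀ y ∈ kv.2, x - y < -bin_size ∨ x = y)) ∧
  (offsetDict.map Prod.fst).Nodup
instance (offsetDict : List (String × List Int)) (bin_size : Int) : Decidable (Pre_rankHistograms offsetDict bin_size) := by unfold Pre_rankHistograms; infer_instance
def pvWitness_rankHistograms : (List (String × List Int)) × Int := ([("a", [0, 7, 8]), ("b", [1])], 5)

def Spec_rankHistograms (offsetDict : List (String × List Int)) (bin_size : Int) (out : (List (String × Int)) × (List (String × List Int × Int))) : Prop := out = rankHistograms_alt offsetDict bin_size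
instance (offsetDict : List (String × List Int)) (bin_size : Int) (out : (List (String × Int)) × (List (String × List Int × Int))) : Decidable (Spec_rankHistograms offsetDict bin_size out) := by unfold Spec_rankHistograms; infer_instance

-- ===== CLAIM (what is proved, stated in full; the proofs are below) =====
def Claim_equal_rankHistograms : Prop := ∀ (offsetDict : List (String × List Int)) (bin_size : Int), Dom_rankHistograms offsetDict bin_size → Pre_rankHistograms offsetDict bin_size → Spec_rankHistograms offsetDict bin_size (rankHistograms offsetDict bin_size)

-- ===== LEMMAS AND PROOFS =====

-- the (floor) bucket of value i, and the number of elements of h in bucket k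
def pvBkt (minh bin i : Int) : Int := (i - minh) / bin
def pvCnt (h : List Int) (minh bin k : Int) : Nat := h.countP (fun i => pvBkt minh bin i == k)

lemma pv_tdiv_eq (minh bin i : Int) (hmin : minh ≤ i) (_hb : 0 < bin) :
    PySem.Int.truncdiv (i - minh) bin = pvBkt minh bin i := by
  simp only [PySem.Int.truncdiv, pvBkt]
  exact Int.tdiv_eq_ediv_of_nonneg (by omega)

lemma pv_tdiv_zero (a b : Int) (h0 : 0 ≤ a) (hb : a < -b) :
    PySem.Int.truncdiv a b = 0 := by
  simp only [PySem.Int.truncdiv]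
  have : a.tdiv (-(-b)) = -(a.tdiv (-b)) := Int.tdiv_neg a (-b)
  rw [neg_neg] at this
  rw [this, Int.tdiv_eq_ediv_of_nonneg h0, Int.ediv_eq_zero_of_lt h0 hb, neg_zero]

-- A's in-place histogram fill: after the fold, cell k holds its start value plus the bucket count
lemma pv_hist_fold (minh bin : Int) (hb : 0 < bin) :
    ∀ (h : List Int) (acc : List Int),
      (∀ i ∈ h, minh ≤ i ∧ (pvBkt minh bin i).toNat < acc.length) →
      (h.foldl (fun a i =>
        PySem.List.pySetD a (PySem.Int.truncdiv (i - minh) bin)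
          (PySem.List.pyGetD a (PySem.Int.truncdiv (i - minh) bin) 0 + 1)) acc).length = acc.length ∧
      ∀ k : Nat, k < acc.length →
        PySem.List.pyGetD (h.foldl (fun a i =>
          PySem.List.pySetD a (PySem.Int.truncdiv (i - minh) bin)
            (PySem.List.pyGetD a (PySem.Int.truncdiv (i - minh) bin) 0 + 1)) acc) (k : Int) 0
        = PySem.List.pyGetD acc (k : Int) 0 + (pvCnt h minh bin (k : Int) : Int) := by
  intro h
  induction h with
  | nil => intro acc _; simp [pvCnt]
  | cons i t ih =>
    intro acc hall
    obtain ⟨hmi, hlt⟩ := hall i (List.mem_cons_self ..)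
    have hnn : 0 ≤ pvBkt minh bin i := Int.ediv_nonneg (by omega) (le_of_lt hb)
    have hcast : pvBkt minh bin i = ((pvBkt minh bin i).toNat : Int) := (Int.toNat_of_nonneg hnn).symm
    set n := (pvBkt minh bin i).toNat with hn
    simp only [List.foldl_cons]
    rw [pv_tdiv_eq minh bin i hmi hb, hcast]
    set acc' := PySem.List.pySetD acc (n : Int) (PySem.List.pyGetD acc (n : Int) 0 + 1) with hacc'
    have hlen' : acc'.length = acc.length := PySem.List.length_pySetD ..
    have hall' : ∀ j ∈ t, minh ≤ j ∧ (pvBkt minh bin j).toNat < acc'.length := by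
      intro j hj; rw [hlen']; exact hall j (List.mem_cons_of_mem _ hj)
    obtain ⟨ihlen, ihval⟩ := ih acc' hall'
    refine ⟨by rw [ihlen, hlen'], ?_⟩
    intro k hk
    rw [ihval k (by rw [hlen']; exact hk)]
    have hget : PySem.List.pyGetD acc' (k : Int) 0
        = if k = n then PySem.List.pyGetD acc (n : Int) 0 + 1 else PySem.List.pyGetD acc (k : Int) 0 :=
      PySem.List.pyGetD_pySetD_natCast acc n k _ 0 hlt
    have hcnt : pvCnt (i :: t) minh bin (k : Int)
        = pvCnt t minh bin (k : Int) + (if pvBkt minh bin i == (k : Int) then 1 else 0) := by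
      simp [pvCnt, List.countP_cons]
    rw [hget, hcnt]
    by_cases hkn : k = n
    · have hbeq : (pvBkt minh bin i == (k : Int)) = true := by
        rw [beq_iff_eq]; omega
      rw [if_pos hkn, hbeq, hkn]
      push_cast
      simp only [if_true]
      ring
    · have : (pvBkt minh bin i == (k : Int)) = false := by
        rw [beq_eq_false_iff_ne]; omega
      rw [if_neg hkn, this]
      push_cast
      simp

-- A's histogram fill when every element lands in bucket 0
lemma pv_fold_single (bin minh : Int) :
    ∀ (t : List Int) (c : Int), (∀ i ∈ t, PySem.Int.truncdiv (i - minh) bin = 0) →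
      t.foldl (fun a i =>
        PySem.List.pySetD a (PySem.Int.truncdiv (i - minh) bin)
          (PySem.List.pyGetD a (PySem.Int.truncdiv (i - minh) bin) 0 + 1)) [c] = [c + t.length] := by
  intro t
  induction t with
  | nil => intro c _; simp
  | cons i t ih =>
    intro c hall
    have hi0 : PySem.Int.truncdiv (i - minh) bin = 0 := hall i (List.mem_cons_self ..)
    have hstep : PySem.List.pySetD [c] (PySem.Int.truncdiv (i - minh) bin)
        (PySem.List.pyGetD [c] (PySem.Int.truncdiv (i - minh) bin) 0 + 1) = [c + 1] := by
      rw [hi0]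
      simp [PySem.List.pySetD_of_nonneg, PySem.List.pyGetD_zero_cons]
    simp only [List.foldl_cons, hstep]
    rw [ih (c + 1) (fun j hj => hall j (List.mem_cons_of_mem _ hj))]
    congr 1
    simp only [List.length_cons]
    push_cast
    omega

-- ---- the maximum multiplicity of a list (max over x ∈ l of count x l) ----
def pvMC (l : List Int) : Nat := (l.map (fun x => l.count x)).foldr max 0

lemma pv_foldr_max_le {l : List Nat} {a : Nat} (h : a ∈ l) : a ≤ l.foldr max 0 := by
  induction l with
  | nil => cases h
  | cons b t ih =>
    rcases List.mem_cons.1 h with rfl | hm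
    · exact Nat.le_max_left _ _
    · exact le_trans (ih hm) (Nat.le_max_right _ _)

lemma pv_foldr_max_mem (l : List Nat) (hne : l ≠ []) : l.foldr max 0 ∈ l ∨ l.foldr max 0 = 0 := by
  induction l with
  | nil => exact absurd rfl hne
  | cons b t ih =>
    cases t with
    | nil => left; simp
    | cons c u =>
      rcases ih (by simp) with hm | h0
      · by_cases hb : (c :: u).foldr max 0 ≤ b
        · left
          have hE : (b :: c :: u).foldr max 0 = b := by
            simp only [List.foldr_cons] at *; omega
          rw [hE]; exact List.mem_cons_self ..
        · left
          have hE : (b :: c :: u).foldr max 0 = (c :: u).foldr max 0 := by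
            simp only [List.foldr_cons] at *; omega
          rw [hE]; exact List.mem_cons_of_mem _ hm
      · simp only [List.foldr_cons] at h0 ⊢
        rw [h0]
        by_cases hb : b = 0
        · right; simp [hb]
        · left
          have hE : max b 0 = b := by omega
          rw [hE]; exact List.mem_cons_self ..

lemma pvMC_le {l : List Int} {x : Int} (h : x ∈ l) : l.count x ≤ pvMC l := by
  exact pv_foldr_max_le (List.mem_map_of_mem h)

lemma pvMC_mem {l : List Int} (hne : l ≠ []) : ∃ x ∈ l, pvMC l = l.count x := by
  have hmne : l.map (fun x => l.count x) ≠ [] := by simpa using hne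
  rcases pv_foldr_max_mem _ hmne with hm | h0
  · obtain ⟨x, hx, hxe⟩ := List.exists_of_mem_map hm
    exact ⟨x, hx, hxe.symm⟩
  · obtain ⟨y, hy⟩ := List.exists_mem_of_ne_nil l hne
    have h1 : 1 ≤ l.count y := List.count_pos_iff.2 hy
    have h2 := pvMC_le hy
    unfold pvMC at h2
    omega

lemma pvMC_cons (w : Int) (s : List Int) :
    pvMC (w :: s) = max ((w :: s).count w) (pvMC (s.filter (fun y => y ≠ w))) := by
  apply Nat.le_antisymm
  · obtain ⟨x, hx, hxe⟩ := pvMC_mem (l := w :: s) (by simp)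
    rw [hxe]
    rcases List.mem_cons.1 hx with rfl | hxs
    · exact Nat.le_max_left _ _
    · by_cases hxw : x = w
      · subst hxw; exact Nat.le_max_left _ _
      · have hcc : (w :: s).count x = (s.filter (fun y => y ≠ w)).count x := by
          rw [List.count_cons_of_ne (fun h => hxw h.symm),
              List.count_filter (p := fun y => decide (y ≠ w)) (by simpa using hxw)]
        rw [hcc]
        refine le_trans (pvMC_le ?_) (Nat.le_max_right _ _)
        exact List.mem_filter.2 ⟨hxs, by simpa using hxw⟩
  · apply Nat.max_le.2
    constructor
    · exact pvMC_le (List.mem_cons_self ..)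
    · by_cases hfe : s.filter (fun y => y ≠ w) = []
      · rw [hfe]; simp [pvMC]
      · obtain ⟨y, hy, hye⟩ := pvMC_mem hfe
        rw [hye]
        obtain ⟨hys, hyw⟩ := List.mem_filter.1 hy
        have : (s.filter (fun y => y ≠ w)).count y = (w :: s).count y := by
          have hyw' : y ≠ w := by simpa using hyw
          rw [List.count_cons_of_ne (fun h => hyw' h.symm),
              List.count_filter (p := fun y => decide (y ≠ w)) hyw]
        rw [this]
        exact pvMC_le (List.mem_cons_of_mem _ hys)

-- ---- the longest-run scan ----
-- pure value of the running `cur`-maximum after the first element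
def pvMaxF : List Int → Int → Int → Int
  | [], c, _ => c
  | v :: t, c, x => max (if x = v then c + 1 else 1) (pvMaxF t (if x = v then c + 1 else 1) v)

lemma pv_run_fold (t : List Int) : ∀ (B c x : Int), c ≤ B →
    (t.foldl (fun (st : Int × Int × Option Int) b =>
      let cur := if st.2.2 = some b then st.2.1 + 1 else 1
      (max st.1 cur, cur, some b)) (B, c, some x)).1 = max B (pvMaxF t c x) := by
  induction t with
  | nil => intro B c x hc; simpa using hc
  | cons v t ih =>
    intro B c x hc
    simp only [List.foldl_cons]
    by_cases hxv : x = v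
    · have hcond : (some x = some v) := by rw [hxv]
      simp only [hcond, if_pos]
      rw [ih (max B (c+1)) (c+1) v (le_max_right _ _)]
      simp only [pvMaxF, if_pos hxv]
      rw [max_assoc]
    · have hcond : ¬ (some x = some v) := by simpa using hxv
      simp only [hcond, if_false]
      rw [ih (max B 1) 1 v (le_max_right _ _)]
      simp only [pvMaxF, if_neg hxv]
      rw [max_assoc]

lemma pv_maxF_count (t : List Int) : ∀ (v c : Int), 1 ≤ c → (∀ y ∈ t, v ≤ y) →
    t.Pairwise (· ≤ ·) →
    max c (pvMaxF t c v) = max (c + (t.count v : Int)) ((pvMC (t.filter (fun y => y ≠ v)) : Int)) := by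
  induction t with
  | nil =>
    intro v c hc _ _
    simp only [pvMaxF, List.count_nil, List.filter_nil]
    have : pvMC [] = 0 := by simp [pvMC]
    rw [this]
    push_cast
    omega
  | cons w s ih =>
    intro v c hc hle hp
    have hvw : v ≤ w := hle w (List.mem_cons_self ..)
    have hps : s.Pairwise (· ≤ ·) := (List.pairwise_cons.1 hp).2
    have hws : ∀ y ∈ s, w ≤ y := (List.pairwise_cons.1 hp).1
    by_cases hvw' : v = w
    · subst hvw'
      simp only [pvMaxF, if_true]
      have h1 : max c (max (c + 1) (pvMaxF s (c + 1) v)) = max (c + 1) (pvMaxF s (c + 1) v) := by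
        rw [max_eq_right]
        exact le_trans (by omega) (le_max_left _ _)
      rw [h1, ih v (c + 1) (by omega) hws hps]
      have hcount : (v :: s).count v = s.count v + 1 := List.count_cons_self ..
      have hfilter : (v :: s).filter (fun y => y ≠ v) = s.filter (fun y => y ≠ v) := by
        simp
      rw [hcount, hfilter]
      congr 1
      push_cast
      ring
    · simp only [pvMaxF, if_neg hvw']
      have h1 : max c (max 1 (pvMaxF s 1 w)) = max c (max (1 + (s.count w : Int)) ((pvMC (s.filter (fun y => y ≠ w)) : Int))) := by
        rw [ih w 1 le_rfl hws hps]
      have hnv : ∀ y ∈ w :: s, y ≠ v := by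
        intro y hy
        rcases List.mem_cons.1 hy with rfl | hys
        · exact fun h => hvw' h.symm
        · intro h
          have := hws y hys
          have := hle y (List.mem_cons_of_mem _ hys)
          apply hvw'
          omega
      have hcount0 : (w :: s).count v = 0 := by
        rw [List.count_eq_zero]
        intro hv
        exact hnv v hv rfl
      have hfilter : (w :: s).filter (fun y => y ≠ v) = w :: s := by
        rw [List.filter_eq_self]
        intro y hy
        simpa using hnv y hy
      rw [hcount0, hfilter]
      have hMC : pvMC (w :: s) = max ((w :: s).count w) (pvMC (s.filter (fun y => y ≠ w))) := pvMC_cons w s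
      have hcw : (w :: s).count w = s.count w + 1 := List.count_cons_self ..
      rw [h1, hMC, hcw]
      have hpush : ((max (s.count w + 1) (pvMC (s.filter (fun y => y ≠ w))) : Nat) : Int)
          = max ((s.count w : Int) + 1) ((pvMC (s.filter (fun y => y ≠ w)) : Int)) := by
        push_cast
        rfl
      rw [hpush]
      have : (1 : Int) + (s.count w : Int) = (s.count w : Int) + 1 := by ring
      rw [this]
      omega

-- on a nondecreasing nonempty list the longest run of equal values is the max multiplicity
lemma pv_run_eq_MC (bs : List Int) (hne : bs ≠ []) (hp : bs.Pairwise (· ≤ ·)) :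
    (bs.foldl (fun (st : Int × Int × Option Int) b =>
      let cur := if st.2.2 = some b then st.2.1 + 1 else 1
      (max st.1 cur, cur, some b)) (0, 0, none)).1 = (pvMC bs : Int) := by
  cases bs with
  | nil => exact absurd rfl hne
  | cons b0 bt =>
    have hstep1 : ((b0 :: bt).foldl (fun (st : Int × Int × Option Int) b =>
        let cur := if st.2.2 = some b then st.2.1 + 1 else 1
        (max st.1 cur, cur, some b)) (0, 0, none))
        = (bt.foldl (fun (st : Int × Int × Option Int) b =>
        let cur := if st.2.2 = some b then st.2.1 + 1 else 1
        (max st.1 cur, cur, some b)) (1, 1, some b0)) := by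
      simp
    rw [hstep1, pv_run_fold bt 1 1 b0 le_rfl]
    have hle : ∀ y ∈ bt, b0 ≤ y := (List.pairwise_cons.1 hp).1
    have hps : bt.Pairwise (· ≤ ·) := (List.pairwise_cons.1 hp).2
    have h2 : max 1 (pvMaxF bt 1 b0) = max (1 + (bt.count b0 : Int)) ((pvMC (bt.filter (fun y => y ≠ b0)) : Int)) :=
      pv_maxF_count bt b0 1 le_rfl hle hps
    rw [h2]
    have hMC : pvMC (b0 :: bt) = max ((b0 :: bt).count b0) (pvMC (bt.filter (fun y => y ≠ b0))) := pvMC_cons b0 bt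
    have hcw : (b0 :: bt).count b0 = bt.count b0 + 1 := List.count_cons_self ..
    rw [hMC, hcw]
    push_cast
    omega

-- ---- the per-key score equality ----
lemma pv_score_eq (bin : Int) (h : List Int) (hne : h ≠ []) (minh maxh : Int)
    (hmin : PySem.List.min? h (fun x => x) = some minh)
    (hmax : PySem.List.max? h (fun x => x) = some maxh)
    (hcase : 0 < bin ∨ maxh - minh < -bin) :
    (PySem.List.max? (h.foldl (fun a i =>
        PySem.List.pySetD a (PySem.Int.truncdiv (i - minh) bin)
          (PySem.List.pyGetD a (PySem.Int.truncdiv (i - minh) bin) 0 + 1))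
        (List.replicate (PySem.Int.truncdiv (maxh - minh) bin + 1).toNat (0 : Int))) (fun x => x)).getD 0
    = ((PySem.List.sorted h (fun x => x) false).foldl
        (fun (st : Int × Int × Option Int) v =>
          let b := PySem.Int.truncdiv (v - minh) bin
          let cur := if st.2.2 = some b then st.2.1 + 1 else 1
          (max st.1 cur, cur, some b)) (0, 0, none)).1 := by
  have hminmax : minh ≤ maxh := PySem.List.min?_isMin hmin maxh (PySem.List.max?_mem hmax)
  -- B's scan is a fold over the bucket list of the sorted offsets
  rw [show ((PySem.List.sorted h (fun x => x) false).foldl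
        (fun (st : Int × Int × Option Int) v =>
          let b := PySem.Int.truncdiv (v - minh) bin
          let cur := if st.2.2 = some b then st.2.1 + 1 else 1
          (max st.1 cur, cur, some b)) (0, 0, none))
      = (((PySem.List.sorted h (fun x => x) false).map (fun v => PySem.Int.truncdiv (v - minh) bin)).foldl
        (fun (st : Int × Int × Option Int) b =>
          let cur := if st.2.2 = some b then st.2.1 + 1 else 1
          (max st.1 cur, cur, some b)) (0, 0, none)) from by rw [List.foldl_map]]
  set s := PySem.List.sorted h (fun x => x) false with hs
  have hsne : s ≠ [] := by rw [hs]; simpa [PySem.List.sorted_eq_nil_iff] using hne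
  have hsmem : ∀ v, v ∈ s ↔ v ∈ h := fun v => PySem.List.mem_sorted h _ false v
  have hsp : s.Pairwise (· ≤ ·) := by
    have := PySem.List.sorted_pairwise h (fun x => x)
    rw [← hs] at this
    exact this
  have hslen : s.length = h.length := by rw [hs]; exact PySem.List.length_sorted ..
  rcases hcase with hb | hsm
  · -- positive bin: histogram cells hold bucket counts; longest run = max multiplicity
    have hT : PySem.Int.truncdiv (maxh - minh) bin = pvBkt minh bin maxh := pv_tdiv_eq minh bin maxh hminmax hb
    have hTnn : 0 ≤ pvBkt minh bin maxh := Int.ediv_nonneg (by omega) (le_of_lt hb)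
    set L := (PySem.Int.truncdiv (maxh - minh) bin + 1).toNat with hL
    have hLpos : 0 < L := by rw [hL, hT]; omega
    have hall : ∀ i ∈ h, minh ≤ i ∧ (pvBkt minh bin i).toNat < L := by
      intro i hi
      have h1 : minh ≤ i := PySem.List.min?_isMin hmin i hi
      have h2 : i ≤ maxh := PySem.List.max?_isMax hmax i hi
      have h3 : pvBkt minh bin i ≤ pvBkt minh bin maxh := Int.ediv_le_ediv hb (by omega)
      refine ⟨h1, ?_⟩
      rw [hL, hT]
      omega
    set HF := h.foldl (fun a i =>
        PySem.List.pySetD a (PySem.Int.truncdiv (i - minh) bin)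
          (PySem.List.pyGetD a (PySem.Int.truncdiv (i - minh) bin) 0 + 1))
        (List.replicate L (0 : Int)) with hHF
    obtain ⟨hlen, hval⟩ := pv_hist_fold minh bin hb h (List.replicate L (0 : Int))
      (by intro i hi; simpa using hall i hi)
    rw [← hHF] at hlen hval
    simp only [List.length_replicate] at hlen
    have hvalAt : ∀ k : Nat, (hk : k < L) → ∀ (hk' : k < HF.length), HF[k] = (pvCnt h minh bin (k : Int) : Int) := by
      intro k hk hk'
      have := hval k (by simpa using hk)
      rw [PySem.List.pyGetD_natCast, PySem.List.pyGetD_natCast, List.getD_eq_getElem _ _ hk',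
          List.getD_replicate _ hk] at this
      omega
    -- the bucket list of the sorted offsets
    have hmapT : s.map (fun v => PySem.Int.truncdiv (v - minh) bin) = s.map (pvBkt minh bin) := by
      apply List.map_congr_left
      intro v hv
      exact pv_tdiv_eq minh bin v ((hall v ((hsmem v).1 hv)).1) hb
    rw [hmapT]
    set bs := s.map (pvBkt minh bin) with hbs
    have hbsne : bs ≠ [] := by simpa [hbs] using hsne
    have hbsp : bs.Pairwise (· ≤ ·) :=
      List.Pairwise.map _ (fun a b hab => Int.ediv_le_ediv hb (by omega)) hsp
    rw [pv_run_eq_MC bs hbsne hbsp]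
    have hperm : bs.Perm (h.map (pvBkt minh bin)) := (PySem.List.sorted_perm h (fun x => x) false).map _
    have hcount : ∀ k : Int, bs.count k = pvCnt h minh bin k := by
      intro k
      rw [hperm.count_eq]
      simp [List.count, List.countP_map, pvCnt, Function.comp_def]
    have hHFne : HF ≠ [] := by
      intro hcon; rw [hcon] at hlen; simp at hlen; omega
    obtain ⟨m, hm⟩ : ∃ m, PySem.List.max? HF (fun x => x) = some m := by
      cases hmm : PySem.List.max? HF (fun x => x) with
      | none => exact absurd ((PySem.List.max?_eq_none_iff _ _).1 hmm) hHFne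
      | some m => exact ⟨m, rfl⟩
    rw [hm]
    have hcntMem : ∀ i ∈ h, (pvCnt h minh bin (pvBkt minh bin i) : Int) ∈ HF := by
      intro i hi
      obtain ⟨h1, h2⟩ := hall i hi
      have hnn : 0 ≤ pvBkt minh bin i := Int.ediv_nonneg (by omega) (le_of_lt hb)
      have hk' : (pvBkt minh bin i).toNat < HF.length := by omega
      have := hvalAt (pvBkt minh bin i).toNat h2 hk'
      rw [Int.toNat_of_nonneg hnn] at this
      exact this ▸ List.getElem_mem hk'
    obtain ⟨i0, hi0⟩ : ∃ i0, i0 ∈ h := List.exists_mem_of_ne_nil h hne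
    have hone : 1 ≤ pvCnt h minh bin (pvBkt minh bin i0) := by
      apply List.countP_pos_iff.2
      exact ⟨i0, hi0, by simp⟩
    have hm1 : 1 ≤ m := by
      have hle := PySem.List.max?_isMax hm _ (hcntMem i0 hi0)
      simp only at hle
      omega
    have hmle : m ≤ (pvMC bs : Int) := by
      obtain ⟨k, hk, hkeq⟩ := List.mem_iff_getElem.1 (PySem.List.max?_mem hm)
      have hkL : k < L := by omega
      have hmcnt : m = (pvCnt h minh bin (k : Int) : Int) := by rw [← hkeq, hvalAt k hkL hk]
      have hz : pvCnt h minh bin (k : Int) ≠ 0 := by omega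
      obtain ⟨i, hi, hpi⟩ := List.countP_pos_iff.1 (Nat.pos_of_ne_zero hz)
      have hbk : pvBkt minh bin i = (k : Int) := beq_iff_eq.1 hpi
      have hmem : (k : Int) ∈ bs := by
        rw [hperm.mem_iff, ← hbk]
        exact List.mem_map_of_mem hi
      have := pvMC_le hmem
      rw [hcount] at this
      omega
    have hlem : (pvMC bs : Int) ≤ m := by
      obtain ⟨x, hx, hxe⟩ := pvMC_mem hbsne
      have hxh : x ∈ h.map (pvBkt minh bin) := hperm.mem_iff.1 hx
      obtain ⟨i, hi, hie⟩ := List.exists_of_mem_map hxh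
      subst hie
      have := PySem.List.max?_isMax hm _ (hcntMem i hi)
      simp only at this
      rw [hxe, hcount]
      omega
    simp only [Option.getD_some]
    omega
  · -- bin_size < 0 with small spread: a single bucket, both sides count all offsets
    have hT0 : ∀ v ∈ h, PySem.Int.truncdiv (v - minh) bin = 0 := by
      intro v hv
      have h1 : minh ≤ v := PySem.List.min?_isMin hmin v hv
      have h2 : v ≤ maxh := PySem.List.max?_isMax hmax v hv
      exact pv_tdiv_zero _ _ (by omega) (by omega)
    have hTm : PySem.Int.truncdiv (maxh - minh) bin = 0 :=
      pv_tdiv_zero _ _ (by omega) (by omega)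
    rw [hTm]
    rw [show ((0 : Int) + 1).toNat = 1 from rfl, show List.replicate 1 (0 : Int) = [0] from rfl]
    rw [pv_fold_single bin minh h 0 hT0, zero_add]
    have hmapT : s.map (fun v => PySem.Int.truncdiv (v - minh) bin) = List.replicate h.length 0 := by
      rw [show s.map (fun v => PySem.Int.truncdiv (v - minh) bin) = s.map (fun _ => (0 : Int)) from
        List.map_congr_left (fun v hv => hT0 v ((hsmem v).1 hv))]
      rw [List.map_const', hslen]
    rw [hmapT]
    have hrepne : List.replicate h.length (0 : Int) ≠ [] := by
      have hln : h.length ≠ 0 := fun hc => hne (List.length_eq_zero_iff.1 hc)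
      simpa [List.replicate_eq_nil_iff] using hln
    rw [pv_run_eq_MC _ hrepne (by
      rw [List.pairwise_replicate]
      right
      exact le_rfl)]
    obtain ⟨x, hx, hxe⟩ := pvMC_mem hrepne
    have hx0 : x = 0 := List.eq_of_mem_replicate hx
    rw [hxe, hx0, List.count_replicate_self]
    rw [PySem.List.max?_id_cons]
    simp

-- ---- staged-pipeline bookkeeping ----
lemma pv_foldl_if_append {α β : Type} (G : α → Prop) [DecidablePred G] (f : α → β) :
    ∀ (l : List α) (acc : List β),
      l.foldl (fun a x => if G x then a ++ [f x] else a) acc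
        = acc ++ (l.filter (fun x => decide (G x))).map f := by
  intro l
  induction l with
  | nil => intro acc; simp
  | cons x t ih =>
    intro acc
    simp only [List.foldl_cons, List.filter_cons]
    by_cases hx : G x
    · simp only [hx, decide_true, if_true]
      rw [ih]
      simp
    · simp only [hx, decide_false, if_false]
      rw [ih]
      simp

lemma pv_foldl_pair_if {α β γ : Type} (G : α → Prop) [DecidablePred G]
    (f : α → β) (g : γ → α → γ) :
    ∀ (l : List α) (p : List β) (d : γ),
      l.foldl (fun acc x => if G x then (acc.1 ++ [f x], g acc.2 x) else acc) (p, d)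
      = (p ++ (l.filter (fun x => decide (G x))).map f,
         (l.filter (fun x => decide (G x))).foldl g d) := by
  intro l
  induction l with
  | nil => intro p d; simp
  | cons x t ih =>
    intro p d
    simp only [List.foldl_cons, List.filter_cons]
    by_cases hx : G x
    · simp only [hx, decide_true, if_true]
      rw [ih]
      simp
    · simp only [hx, decide_false, if_false]
      rw [ih]
      simp

-- ===== VERDICT (by name: the statement is the Claim_ definition above) =====
theorem rankHistograms_spec : Claim_equal_rankHistograms := by
  intro offsetDict bin_size _ hpre
  obtain ⟨hkv, hnodup⟩ := hpre
  unfold Spec_rankHistograms rankHistograms rankHistograms_alt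
  have hdict : ∀ kv ∈ offsetDict, (PySem.Dict.mk offsetDict).getD kv.1 [] = kv.2 := by
    intro kv hkv'
    exact PySem.Dict.getD_of_mem_items (PySem.Dict.mk offsetDict)
      (by simpa using hkv') (by simpa [PySem.Dict.keys] using hnodup) []
  -- A's fused pass, with the dict lookup replaced by the pair's own value
  have hA : (offsetDict.foldl (fun (acc : List (String × Int) × PySem.Dict String (List Int × Int)) kv =>
      let h := (PySem.Dict.mk offsetDict).getD kv.1 []
      let maxh := (PySem.List.max? h (fun x => x)).getD 0
      let minh := (PySem.List.min? h (fun x => x)).getD 0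
      if maxh > minh + bin_size then
        let hist0 := List.replicate (PySem.Int.truncdiv (maxh - minh) bin_size + 1).toNat (0 : Int)
        let hist := h.foldl (fun a i =>
          PySem.List.pySetD a (PySem.Int.truncdiv (i - minh) bin_size)
            (PySem.List.pyGetD a (PySem.Int.truncdiv (i - minh) bin_size) 0 + 1)) hist0
        let score := (PySem.List.max? hist (fun x => x)).getD 0
        (acc.1 ++ [(kv.1, score)], acc.2.insert kv.1 (h, ((PySem.Set.ofList h).length : Int)))
      else acc) ([], PySem.Dict.empty))
      = (offsetDict.foldl (fun (acc : List (String × Int) × PySem.Dict String (List Int × Int)) kv =>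
      if (PySem.List.max? kv.2 (fun x => x)).getD 0 > (PySem.List.min? kv.2 (fun x => x)).getD 0 + bin_size then
        (acc.1 ++ [(kv.1,
          (PySem.List.max? (kv.2.foldl (fun a i =>
            PySem.List.pySetD a (PySem.Int.truncdiv (i - (PySem.List.min? kv.2 (fun x => x)).getD 0) bin_size)
              (PySem.List.pyGetD a (PySem.Int.truncdiv (i - (PySem.List.min? kv.2 (fun x => x)).getD 0) bin_size) 0 + 1))
            (List.replicate (PySem.Int.truncdiv ((PySem.List.max? kv.2 (fun x => x)).getD 0 - (PySem.List.min? kv.2 (fun x => x)).getD 0) bin_size + 1).toNat (0 : Int))) (fun x => x)).getD 0)],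
         acc.2.insert kv.1 (kv.2, ((PySem.Set.ofList kv.2).length : Int)))
      else acc) ([], PySem.Dict.empty)) := by
    apply PySem.List.foldl_congr_mem
    intro acc kv hkv'
    simp only [hdict kv hkv']
  rw [hA,
      pv_foldl_pair_if (fun kv : String × List Int =>
        (PySem.List.max? kv.2 (fun x => x)).getD 0 > (PySem.List.min? kv.2 (fun x => x)).getD 0 + bin_size)
        (fun kv => (kv.1,
          (PySem.List.max? (kv.2.foldl (fun a i =>
            PySem.List.pySetD a (PySem.Int.truncdiv (i - (PySem.List.min? kv.2 (fun x => x)).getD 0) bin_size)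
              (PySem.List.pyGetD a (PySem.Int.truncdiv (i - (PySem.List.min? kv.2 (fun x => x)).getD 0) bin_size) 0 + 1))
            (List.replicate (PySem.Int.truncdiv ((PySem.List.max? kv.2 (fun x => x)).getD 0 - (PySem.List.min? kv.2 (fun x => x)).getD 0) bin_size + 1).toNat (0 : Int))) (fun x => x)).getD 0))
        (fun d kv => d.insert kv.1 (kv.2, ((PySem.Set.ofList kv.2).length : Int)))
        offsetDict [] PySem.Dict.empty]
  -- B's stage-1 kept list
  rw [show (offsetDict.foldl (fun (acc : List (String × List Int × Int)) kv =>
      let minh := (PySem.List.min? kv.2 (fun x => x)).getD 0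
      if (PySem.List.max? kv.2 (fun x => x)).getD 0 > minh + bin_size then
        acc ++ [(kv.1, kv.2, minh)]
      else acc) [])
      = (offsetDict.filter (fun kv => decide
          ((PySem.List.max? kv.2 (fun x => x)).getD 0 > (PySem.List.min? kv.2 (fun x => x)).getD 0 + bin_size))).map
        (fun kv => (kv.1, kv.2, (PySem.List.min? kv.2 (fun x => x)).getD 0)) from
    pv_foldl_if_append _ _ offsetDict []]
  set kept := (offsetDict.filter (fun kv => decide
      ((PySem.List.max? kv.2 (fun x => x)).getD 0 > (PySem.List.min? kv.2 (fun x => x)).getD 0 + bin_size))).map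
    (fun kv => (kv.1, kv.2, (PySem.List.min? kv.2 (fun x => x)).getD 0)) with hkept
  simp only [List.nil_append]
  refine congrArg₂ Prod.mk ?_ ?_
  · -- the score lists agree key by key
    apply congrArg (fun l => PySem.List.sorted l (fun x : String × Int => x.2) true)
    rw [hkept, List.map_map]
    apply List.map_congr_left
    intro kv hkvf
    obtain ⟨hkvm, hgb⟩ := List.mem_filter.1 hkvf
    have hguard : (PySem.List.max? kv.2 (fun x => x)).getD 0 > (PySem.List.min? kv.2 (fun x => x)).getD 0 + bin_size := of_decide_eq_true hgb
    obtain ⟨hne, hdis⟩ := hkv kv hkvm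
    obtain ⟨minh, hmin⟩ : ∃ m, PySem.List.min? kv.2 (fun x => x) = some m := by
      cases hmm : PySem.List.min? kv.2 (fun x => x) with
      | none => exact absurd ((PySem.List.min?_eq_none_iff _ _).1 hmm) hne
      | some m => exact ⟨m, rfl⟩
    obtain ⟨maxh, hmax⟩ : ∃ m, PySem.List.max? kv.2 (fun x => x) = some m := by
      cases hmm : PySem.List.max? kv.2 (fun x => x) with
      | none => exact absurd ((PySem.List.max?_eq_none_iff _ _).1 hmm) hne
      | some m => exact ⟨m, rfl⟩
    rw [hmin, hmax] at hguard ⊢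
    simp only [Option.getD_some] at hguard ⊢
    have hcase : 0 < bin_size ∨ maxh - minh < -bin_size := by
      rcases hdis with hb | hcon
      · exact Or.inl hb
      · rcases hcon maxh (PySem.List.max?_mem hmax) minh (PySem.List.min?_mem hmin) with hlt | heq
        · exact Or.inr hlt
        · right
          omega
    refine congrArg (fun z => (kv.1, z)) ?_
    simp only [hmin, Option.getD_some]
    exact pv_score_eq bin_size kv.2 hne minh maxh hmin hmax hcase
  · -- the histogram dicts agree
    apply congrArg PySem.Dict.items
    rw [hkept, List.foldl_map]
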